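-- pv_equiv track=rewrite | github.com/jvamancio/coding_interview_google | arrays_and_strings/verifica_grupo.py | verificar_grupo
-- ===== SOURCE A (Python) =====
-- def verificar_grupo(k, array):
--     # Contar ocorrências de cada caractere
--     contagem = {}
--     for char in array:
--         if char in contagem:
--             contagem[char] += 1
--         else:
--             contagem[char] = 1
--
--     # Verificar quais caracteres pertencem ao grupo
--     pertencem = []
--     nao_pertencem = []
--     vistos = {}  # Para rastrear quais caracteres já processamos
--
--     for char in array:
--         if char not in vistos:
--             vistos[char] = True
--             if contagem[char] >= k:
--                 pertencem.append(char)
--             else: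
--                 nao_pertencem.append(char)
--
--     return pertencem, nao_pertencem
-- ===== SOURCE B (Python) =====
-- def verificar_grupo(k, array):
--     # Worklist algorithm, no dict and no seen-set: repeatedly take the first
--     # remaining element, classify it by counting it in the remainder, then
--     # drop all of its occurrences before continuing.
--     pertencem = []
--     nao_pertencem = []
--     rest = list(array)
--     while rest:
--         c = rest[0]
--         if rest.count(c) >= k:
--             pertencem.append(c)
--         else:
--             nao_pertencem.append(c)
--         rest = [x for x in rest if x != c]
--     return pertencem, nao_pertencem
-- ===== Notes on version B (the rewrite author's own statement) =====
-- stated objective: alternative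
-- what changed: Replaces A's two dict-based passes (a count dict plus a seen-dict rescan) with a dict-free worklist loop: classify the first remaining element by list.count, then filter out all its occurrences and repeat; O(n*d) instead of O(n), traded for no auxiliary tables.
import Mathlib
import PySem

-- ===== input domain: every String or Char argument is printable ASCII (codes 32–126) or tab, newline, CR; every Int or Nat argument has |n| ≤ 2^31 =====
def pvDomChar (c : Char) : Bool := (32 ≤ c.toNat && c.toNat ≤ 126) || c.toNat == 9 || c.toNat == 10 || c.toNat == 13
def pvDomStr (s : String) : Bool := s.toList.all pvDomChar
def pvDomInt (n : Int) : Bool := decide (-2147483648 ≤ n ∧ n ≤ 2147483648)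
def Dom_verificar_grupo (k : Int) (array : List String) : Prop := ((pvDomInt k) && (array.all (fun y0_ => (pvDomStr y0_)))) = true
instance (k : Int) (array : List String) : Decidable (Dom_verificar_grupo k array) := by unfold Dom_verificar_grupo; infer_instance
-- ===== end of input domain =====

-- B replaces A's two dict passes by a dict-free worklist loop (classify the head by list.count, filter out its occurrences, repeat): an alternative algorithm, not claimed faster.


-- ===== PORT A =====
def verificar_grupo (k : Int) (array : List String) : List String × List String :=
  -- contagem = {}; for char in array: if char in contagem: contagem[char] += 1 else: contagem[char] = 1
  let contagem : PySem.Dict String Int :=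
    array.foldl (fun d char =>
      if d.contains char then d.modify char 0 (· + 1) else d.insert char 1)
      PySem.Dict.empty
  -- pertencem = []; nao_pertencem = []; vistos = {}
  -- for char in array: if char not in vistos: vistos[char] = True; if contagem[char] >= k: pertencem.append else nao_pertencem.append
  let res : List String × List String × PySem.Dict String Bool :=
    array.foldl (fun st char =>
      if st.2.2.contains char then st
      else
        if contagem.getD char 0 ≥ k then (st.1 ++ [char], st.2.1, st.2.2.insert char true)
        else (st.1, st.2.1 ++ [char], st.2.2.insert char true))
      ([], [], PySem.Dict.empty)
  (res.1, res.2.1)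

-- ===== PORT B =====
-- while rest: c = rest[0]; classify by rest.count(c) >= k; rest = [x for x in rest if x != c]
def pvAltLoop (k : Int) (p n : List String) : List String → List String × List String
  | [] => (p, n)
  | c :: t =>
    if (((c :: t).count c : Int)) ≥ k then
      pvAltLoop k (p ++ [c]) n (t.filter (fun x => x ≠ c))
    else
      pvAltLoop k p (n ++ [c]) (t.filter (fun x => x ≠ c))
termination_by l => l.length
decreasing_by
  all_goals
    simp only [List.length_cons, List.length_unattach]
    exact Nat.lt_succ_of_le (le_trans (List.length_filter_le _ _) (by simp))

def verificar_grupo_alt (k : Int) (array : List String) : List String × List String :=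
  pvAltLoop k [] [] array

-- ===== PRECONDITION & SPEC =====
def Spec_verificar_grupo (k : Int) (array : List String) (out : List String × List String) : Prop := out = verificar_grupo_alt k array
instance (k : Int) (array : List String) (out : List String × List String) : Decidable (Spec_verificar_grupo k array out) := by unfold Spec_verificar_grupo; infer_instance

-- ===== CLAIM (what is proved, stated in full; the proofs are below) =====
def Claim_equal_verificar_grupo : Prop := ∀ (k : Int) (array : List String), Dom_verificar_grupo k array → Spec_verificar_grupo k array (verificar_grupo k array)

-- ===== LEMMAS AND PROOFS =====

-- A's counting dict looks up as a counter.
theorem getD_contagem (l : List String) (d : PySem.Dict String Int) (c : String) :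
    (l.foldl (fun d char =>
      if d.contains char then d.modify char 0 (· + 1) else d.insert char 1) d).getD c 0
      = d.getD c 0 + (l.count c : Int) := by
  induction l generalizing d with
  | nil => simp
  | cons x r ih =>
    simp only [List.foldl_cons, ih]
    by_cases hx : d.contains x
    · simp only [hx, if_true, PySem.Dict.getD_modify]
      by_cases hc : c = x
      · subst hc; simp; omega
      · simp [hc, Ne.symm hc]
    · simp only [hx, Bool.false_eq_true, if_false, PySem.Dict.getD_insert]
      by_cases hc : c = x
      · subst hc
        rw [PySem.Dict.getD_of_not_contains d 0 (by simpa using hx)]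
        simp
        omega
      · simp [hc, Ne.symm hc]

-- the first-occurrence elements of l not yet in vistos (proof-side helper)
def pvFirsts (v : PySem.Dict String Bool) : List String → List String
  | [] => []
  | c :: r => if v.contains c then pvFirsts v r else c :: pvFirsts (v.insert c true) r

theorem pvFirsts_eq_filter (l : List String) (v : PySem.Dict String Bool) :
    pvFirsts v l = (PySem.Set.ofList l).filter (fun c => !v.contains c) := by
  induction l generalizing v with
  | nil => simp [pvFirsts]
  | cons c r ih =>
    rw [PySem.Set.ofList_cons]
    by_cases hc : v.contains c
    · simp only [pvFirsts, hc, if_true, ih, List.filter_cons, Bool.not_true,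
        Bool.false_eq_true, if_false]
      simp only [PySem.Set.discard, List.filter_filter]
      apply List.filter_congr
      intro x _
      by_cases hxc : x = c
      · subst hxc; simp [hc]
      · simp [hxc]
    · simp only [pvFirsts, hc, Bool.false_eq_true, if_false, ih, List.filter_cons,
        Bool.not_false, if_true]
      simp only [PySem.Set.discard, List.filter_filter]
      congr 1
      apply List.filter_congr
      intro x _
      by_cases hxc : x = c
      · subst hxc; simp
      · simp [PySem.Dict.contains_insert, show (x == c) = false by simpa using hxc]

-- A's second loop equals the item-style fold over the not-yet-seen first occurrences.
theorem loopA_eq (q : String → Bool) (l : List String)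
    (p n : List String) (v : PySem.Dict String Bool) :
    (((l.foldl (fun st char =>
        if st.2.2.contains char then st
        else
          if q char then (st.1 ++ [char], st.2.1, st.2.2.insert char true)
          else (st.1, st.2.1 ++ [char], st.2.2.insert char true)) (p, n, v)).1,
      (l.foldl (fun st char =>
        if st.2.2.contains char then st
        else
          if q char then (st.1 ++ [char], st.2.1, st.2.2.insert char true)
          else (st.1, st.2.1 ++ [char], st.2.2.insert char true)) (p, n, v)).2.1)
        : List String × List String)
      = (pvFirsts v l).foldl (fun pn c =>
          if q c then (pn.1 ++ [c], pn.2) else (pn.1, pn.2 ++ [c])) (p, n) := by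
  induction l generalizing p n v with
  | nil => simp [pvFirsts]
  | cons c r ih =>
    by_cases hc : v.contains c
    · simpa [pvFirsts, hc] using ih p n v
    · by_cases hq : q c
      · simpa [pvFirsts, hc, hq] using ih (p ++ [c]) n (v.insert c true)
      · simpa [pvFirsts, hc, hq] using ih p (n ++ [c]) (v.insert c true)

-- ofList commutes with filter
theorem ofList_filter (p : String → Bool) (l : List String) :
    PySem.Set.ofList (l.filter p) = (PySem.Set.ofList l).filter p := by
  induction l with
  | nil => rfl
  | cons c r ih =>
    by_cases hp : p c
    · simp only [List.filter_cons, hp, if_true, PySem.Set.ofList_cons, ih,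
        PySem.Set.discard, List.filter_filter]
      congr 1
      apply List.filter_congr
      intro x _
      by_cases hxc : x = c
      · subst hxc; simp [hp]
      · simp [Bool.and_comm]
    · simp only [List.filter_cons, hp, Bool.false_eq_true, if_false, ih,
        PySem.Set.ofList_cons, PySem.Set.discard, List.filter_filter]
      apply List.filter_congr
      intro x _
      by_cases hxc : x = c
      · subst hxc; simp [hp]
      · simp [hxc]

-- B's worklist loop equals the fold over the first occurrences, classified by counts in rest.
theorem pvAltLoop_eq (k : Int) : ∀ (m : Nat) (rest : List String), rest.length ≤ m →
    ∀ (p n : List String),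
    pvAltLoop k p n rest
      = (PySem.Set.ofList rest).foldl (fun pn c =>
          if ((rest.count c : Int)) ≥ k then (pn.1 ++ [c], pn.2) else (pn.1, pn.2 ++ [c])) (p, n) := by
  intro m
  induction m with
  | zero =>
    intro rest h p n
    have : rest = [] := List.eq_nil_of_length_eq_zero (Nat.le_zero.mp h)
    subst this
    simp [pvAltLoop]
  | succ m ih =>
    intro rest h p n
    match rest with
    | [] => simp [pvAltLoop]
    | c :: t =>
      have hlen : (t.filter (fun x => x ≠ c)).length ≤ m := by
        have := List.length_filter_le (fun x => decide (x ≠ c)) t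
        simp only [List.length_cons, Nat.succ_le_succ_iff] at h
        omega
      have hcount : ∀ x ∈ PySem.Set.ofList (t.filter (fun x => x ≠ c)),
          (t.filter (fun x => x ≠ c)).count x = (c :: t).count x := by
        intro x hx
        have hxmem : x ∈ t.filter (fun x => x ≠ c) := (PySem.Set.mem_ofList _ _).mp hx
        have hxc : x ≠ c := by
          have := List.of_mem_filter hxmem
          simpa using this
        simp [hxc, Ne.symm hxc, List.count_filter]
      have hswap : ∀ (pn : List String × List String),
          (PySem.Set.ofList (t.filter (fun x => x ≠ c))).foldl (fun pn x =>
            if (((t.filter (fun x => x ≠ c)).count x : Int)) ≥ k then (pn.1 ++ [x], pn.2)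
            else (pn.1, pn.2 ++ [x])) pn
          = (PySem.Set.ofList (t.filter (fun x => x ≠ c))).foldl (fun pn x =>
            if (((c :: t).count x : Int)) ≥ k then (pn.1 ++ [x], pn.2)
            else (pn.1, pn.2 ++ [x])) pn := by
        intro pn
        apply PySem.List.foldl_congr_mem
        intro pn' x hx
        rw [hcount x hx]
      have hdis : PySem.Set.discard (PySem.Set.ofList t) c
          = PySem.Set.ofList (t.filter (fun x => x ≠ c)) := by
        rw [ofList_filter]
        simp only [PySem.Set.discard]
        apply List.filter_congr
        intro x _
        by_cases hxc : x = c <;> simp [hxc]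
      rw [PySem.Set.ofList_cons, List.foldl_cons, hdis, pvAltLoop]
      split_ifs with hq
      · rw [ih _ hlen, hswap]
      · rw [ih _ hlen, hswap]

-- ===== VERDICT (by name: the statement is the Claim_ definition above) =====
theorem verificar_grupo_spec : Claim_equal_verificar_grupo := by
  intro k array _
  unfold Spec_verificar_grupo verificar_grupo verificar_grupo_alt
  simp only
  have hA := loopA_eq (fun c =>
      decide ((array.foldl (fun d char =>
        if d.contains char then d.modify char 0 (· + 1) else d.insert char 1)
        PySem.Dict.empty).getD c 0 ≥ k)) array [] [] PySem.Dict.empty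
  simp only [decide_eq_true_eq] at hA
  rw [hA, pvFirsts_eq_filter]
  simp only [PySem.Dict.contains_empty, Bool.not_false, List.filter_true]
  rw [pvAltLoop_eq k array.length array (le_refl _) [] []]
  apply PySem.List.foldl_congr_mem
  intro pn c _
  have h := getD_contagem array PySem.Dict.empty c
  simp only [PySem.Dict.getD_empty, zero_add] at h
  simp [h]
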